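-- pv_equiv track=rewrite | github.com/bobreddy2009/111 | PythonConcepts/max_minus_min.py | maximu_minus_minimum
-- ===== SOURCE A (Python) =====
-- def maximu_minus_minimum(x):
--     min_digits = []
--     max_digits = []
--     for i in str(x):
--         max_digits.append(i)
--         min_digits.append(i)
--     min_digits.sort()
--     minimum = int("".join(min_digits))
--     max_digits.sort(reverse=True)
--     max = int("".join(max_digits))
--     return max-minimum
-- ===== SOURCE B (Python) =====
-- def maximu_minus_minimum(x):
--     counts = {}
--     for c in str(x):
--         counts[c] = counts.get(c, 0) + 1
--     min_s = "".join(chr(i) * counts.get(chr(i), 0) for i in range(128))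
--     max_s = "".join(chr(i) * counts.get(chr(i), 0) for i in range(127, -1, -1))
--     return int(max_s) - int(min_s)
-- ===== Notes on version B (the rewrite author's own statement) =====
-- stated objective: alternative
-- what changed: B replaces A's two comparison sorts of the characters of str(x) with a single counting pass (a dict of character frequencies) and rebuilds the minimum/maximum strings by scanning the ASCII code range ascending resp. descending.
import Mathlib
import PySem

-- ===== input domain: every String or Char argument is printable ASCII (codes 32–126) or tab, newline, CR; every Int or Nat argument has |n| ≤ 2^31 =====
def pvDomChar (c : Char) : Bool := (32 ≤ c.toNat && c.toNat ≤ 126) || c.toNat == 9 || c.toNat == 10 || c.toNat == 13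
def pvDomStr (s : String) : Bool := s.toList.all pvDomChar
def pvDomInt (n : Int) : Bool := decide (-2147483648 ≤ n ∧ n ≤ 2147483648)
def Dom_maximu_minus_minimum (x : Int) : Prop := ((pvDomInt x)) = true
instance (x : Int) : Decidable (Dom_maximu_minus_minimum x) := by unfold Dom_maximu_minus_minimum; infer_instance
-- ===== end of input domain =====

-- B replaces the two character sorts of str(x) with one counting pass (a dict of character
-- frequencies) and rebuilds the min/max digit strings by scanning the ASCII codes upward resp. downward.

-- ===== PORT A =====
def maximu_minus_minimum (x : Int) : Int :=
  -- the for-loop appends each character of str(x) to both min_digits and max_digits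
  let p := (PySem.Int.toChars x).foldl
    (fun (p : List Char × List Char) i => (p.1 ++ [i], p.2 ++ [i])) ([], [])
  -- min_digits.sort(); minimum = int("".join(min_digits))
  let minimum := (PySem.Int.ofChars? (PySem.List.sorted p.1 (fun c => c))).getD 0
  -- max_digits.sort(reverse=True); max = int("".join(max_digits))
  let mx := (PySem.Int.ofChars? (PySem.List.sorted p.2 (fun c => c) true)).getD 0
  mx - minimum

-- ===== PORT B =====
def maximu_minus_minimum_alt (x : Int) : Int :=
  -- counts[c] = counts.get(c, 0) + 1 over str(x)
  let counts := (PySem.Int.toChars x).foldl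
    (fun (d : PySem.Dict Char Int) c => d.insert c (d.getD c 0 + 1)) PySem.Dict.empty
  -- "".join(chr(i) * counts.get(chr(i), 0) for i in range(128))
  let minS := (List.range 128).flatMap
    (fun i => List.replicate (counts.getD (Char.ofNat i) 0).toNat (Char.ofNat i))
  -- same generator over range(127, -1, -1), i.e. the range reversed
  let maxS := (List.range 128).reverse.flatMap
    (fun i => List.replicate (counts.getD (Char.ofNat i) 0).toNat (Char.ofNat i))
  (PySem.Int.ofChars? maxS).getD 0 - (PySem.Int.ofChars? minS).getD 0

-- ===== PRECONDITION & SPEC =====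
-- A raises ValueError on x < 0: the reverse-sorted string puts '-' last ("21-") and int() fails.
def Pre_maximu_minus_minimum (x : Int) : Prop := 0 ≤ x
instance (x : Int) : Decidable (Pre_maximu_minus_minimum x) := by
  unfold Pre_maximu_minus_minimum; infer_instance
def pvWitness_maximu_minus_minimum : Int := 371

def Spec_maximu_minus_minimum (x : Int) (out : Int) : Prop := out = maximu_minus_minimum_alt x
instance (x : Int) (out : Int) : Decidable (Spec_maximu_minus_minimum x out) := by
  unfold Spec_maximu_minus_minimum; infer_instance

-- ===== CLAIM (what is proved, stated in full; the proofs are below) =====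
def Claim_equal_maximu_minus_minimum : Prop := ∀ (x : Int), Dom_maximu_minus_minimum x → Pre_maximu_minus_minimum x → Spec_maximu_minus_minimum x (maximu_minus_minimum x)

-- ===== LEMMAS AND PROOFS =====

-- the ascending counting-sort rearrangement of a character list
def pvBuckets (l : List Char) : List Char :=
  (List.range 128).flatMap (fun i => List.replicate (l.count (Char.ofNat i)) (Char.ofNat i))

lemma pv_foldl_pair (l : List Char) (a b : List Char) :
    l.foldl (fun (p : List Char × List Char) i => (p.1 ++ [i], p.2 ++ [i])) (a, b)
      = (a ++ l, b ++ l) := by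
  induction l generalizing a b with
  | nil => simp
  | cons c t ih => simp [List.foldl_cons, ih]

lemma pv_digitChar_lt (m : Nat) : (Nat.digitChar m).toNat < 128 := by
  rcases Nat.lt_or_ge m 16 with h | h
  · interval_cases m <;> decide
  · have he : Nat.digitChar m = '*' := by
      unfold Nat.digitChar
      repeat rw [if_neg (by omega)]
    rw [he]; decide

lemma pv_toDigitsCore_lt (f : Nat) : ∀ (n : Nat) (ds : List Char),
    (∀ c ∈ ds, c.toNat < 128) → ∀ c ∈ Nat.toDigitsCore 10 f n ds, c.toNat < 128 := by
  induction f with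
  | zero => intro n ds h c hc; exact h c hc
  | succ f ih =>
    intro n ds h c hc
    rw [Nat.toDigitsCore] at hc
    have hcons : ∀ d ∈ (n % 10).digitChar :: ds, d.toNat < 128 := by
      intro d hd
      rcases List.mem_cons.mp hd with rfl | hd
      · exact pv_digitChar_lt _
      · exact h d hd
    split at hc
    · exact hcons c hc
    · exact ih _ _ hcons c hc

lemma pv_toChars_lt (x : Int) (hx : 0 ≤ x) :
    ∀ c ∈ PySem.Int.toChars x, c.toNat < 128 := by
  intro c hc
  unfold PySem.Int.toChars at hc
  rw [if_neg (by omega)] at hc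
  exact pv_toDigitsCore_lt _ _ _ (by simp) c hc

lemma pv_toNat_ofNat (i : Nat) (h : i < 128) : (Char.ofNat i).toNat = i := by
  rw [Char.toNat_ofNat, if_pos (Or.inl (by omega))]

lemma pv_ofNat_le (i j : Nat) (hi : i ≤ j) (hj : j < 128) :
    Char.ofNat i ≤ Char.ofNat j := by
  rw [Char.le_def, UInt32.le_iff_toNat_le]
  have h1 : (Char.ofNat i).val.toNat = i := pv_toNat_ofNat i (by omega)
  have h2 : (Char.ofNat j).val.toNat = j := pv_toNat_ofNat j hj
  omega

lemma pv_count_buckets (l : List Char) (a : Char) :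
    ∀ (N : Nat), N ≤ 128 →
    ((List.range N).flatMap (fun i => List.replicate (l.count (Char.ofNat i)) (Char.ofNat i))).count a
      = if a.toNat < N then l.count a else 0 := by
  intro N
  induction N with
  | zero => simp
  | succ N ih =>
    intro hN
    rw [List.range_succ, List.flatMap_append, List.count_append, ih (by omega)]
    simp only [List.flatMap_cons, List.flatMap_nil, List.append_nil, List.count_replicate]
    by_cases hlt : a.toNat < N
    · have hne : (Char.ofNat N == a) = false := by
        apply beq_false_of_ne
        intro h
        have := pv_toNat_ofNat N (by omega)
        rw [h] at this; omega
      simp [hne, hlt]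
      omega
    · by_cases heq : a.toNat = N
      · have ha : Char.ofNat N = a := by
          conv_rhs => rw [← Char.ofNat_toNat a]
          rw [heq]
        simp only [ha, beq_self_eq_true, if_pos, hlt, if_false]
        simp [heq]
      · have hne : (Char.ofNat N == a) = false := by
          apply beq_false_of_ne
          intro h
          have := pv_toNat_ofNat N (by omega)
          rw [h] at this; omega
        have : ¬ a.toNat < N + 1 := by omega
        simp [hne, hlt, this]

lemma pv_buckets_perm (l : List Char) (hl : ∀ c ∈ l, c.toNat < 128) :
    (pvBuckets l).Perm l := by
  rw [List.perm_iff_count]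
  intro a
  rw [pvBuckets, pv_count_buckets l a 128 le_rfl]
  by_cases h : a.toNat < 128
  · simp [h]
  · have : a ∉ l := fun hm => h (hl a hm)
    simp [h, List.count_eq_zero_of_not_mem this]

lemma pv_buckets_pairwise (l : List Char) :
    ∀ (N : Nat), N ≤ 128 →
    ((List.range N).flatMap (fun i => List.replicate (l.count (Char.ofNat i)) (Char.ofNat i))).Pairwise (· ≤ ·) := by
  intro N
  induction N with
  | zero => simp
  | succ N ih =>
    intro hN
    rw [List.range_succ, List.flatMap_append]
    rw [List.pairwise_append]
    refine ⟨ih (by omega), ?_, ?_⟩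
    · simp only [List.flatMap_cons, List.flatMap_nil, List.append_nil]
      rw [List.pairwise_replicate]
      exact Or.inr le_rfl
    · intro a ha b hb
      simp only [List.mem_flatMap, List.mem_range, List.mem_replicate] at ha
      simp only [List.flatMap_cons, List.flatMap_nil, List.append_nil, List.mem_replicate] at hb
      obtain ⟨i, hiN, _, rfl⟩ := ha
      obtain ⟨_, rfl⟩ := hb
      exact pv_ofNat_le i N (by omega) (by omega)

lemma pv_sorted_asc (l : List Char) (hl : ∀ c ∈ l, c.toNat < 128) :
    PySem.List.sorted l (fun c => c) = pvBuckets l :=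
  PySem.List.sorted_id_eq_of_perm_of_pairwise l (pvBuckets l)
    (pv_buckets_perm l hl) (pv_buckets_pairwise l 128 le_rfl)

lemma pv_sorted_desc (l : List Char) (hl : ∀ c ∈ l, c.toNat < 128) :
    PySem.List.sorted l (fun c => c) true = (pvBuckets l).reverse := by
  refine List.Perm.eq_of_pairwise (le := fun a b => b ≤ a)
    (fun a b _ _ h1 h2 => le_antisymm h2 h1) ?_ ?_ ?_
  · exact PySem.List.sorted_pairwise_rev l (fun c => c)
  · rw [List.pairwise_reverse]
    exact pv_buckets_pairwise l 128 le_rfl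
  · exact ((PySem.List.sorted_perm l (fun c => c) true).trans
      (pv_buckets_perm l hl).symm).trans (pvBuckets l).reverse_perm.symm

lemma pv_buckets_reverse (l : List Char) :
    (pvBuckets l).reverse
      = (List.range 128).reverse.flatMap (fun i => List.replicate (l.count (Char.ofNat i)) (Char.ofNat i)) := by
  rw [pvBuckets, List.reverse_flatMap]
  simp [Function.comp_def, List.reverse_replicate]

lemma pv_counts_getD (l : List Char) (c : Char) :
    ((l.foldl (fun (d : PySem.Dict Char Int) c => d.insert c (d.getD c 0 + 1)) PySem.Dict.empty).getD c 0).toNat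
      = l.count c := by
  rw [PySem.Dict.foldl_insert_getD_add_one_eq_counter, PySem.Dict.getD_counter]
  simp

-- ===== VERDICT (by name: the statement is the Claim_ definition above) =====
theorem maximu_minus_minimum_spec : Claim_equal_maximu_minus_minimum := by
  intro x _ hpre
  unfold Spec_maximu_minus_minimum maximu_minus_minimum maximu_minus_minimum_alt
  have hl := pv_toChars_lt x hpre
  simp only [pv_foldl_pair, List.nil_append, pv_counts_getD]
  rw [pv_sorted_asc _ hl, pv_sorted_desc _ hl, pv_buckets_reverse, pvBuckets]
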